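-- pv_equiv track=rewrite | github.com/devGo20/algorithm | programmers/process.py | solution
-- ===== SOURCE A (Python) =====
-- def solution(progresses, speeds):
--     answer = []
--     while len(progresses) > 0:
--         cnt = 0
--         for i in range(len(progresses)):
--             progresses[i] += speeds[i]
--
--         if progresses[0] >= 100:
--             for i in range(len(progresses)):
--                 if progresses[i] >= 100:
--                     cnt += 1
--                 else:
--                     break
--             answer.append(cnt)
--             for j in range(cnt):
--                 progresses.pop(0)
--                 speeds.pop(0)
--     return answer
-- ===== SOURCE B (Python) =====
-- def solution(progresses, speeds):
--     # One pass: a task's finish day is max(1, ceil((100-p)/s)); tasks deploy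
--     # together while their finish day does not exceed the current group's day.
--     answer = []
--     cur = 0
--     for p, s in zip(progresses, speeds):
--         d = max(1, -((p - 100) // s))
--         if not answer or d > cur:
--             answer.append(1)
--             cur = d
--         else:
--             answer[-1] += 1
--     return answer
-- ===== Notes on version B (the rewrite author's own statement) =====
-- stated objective: alternative
-- what changed: B replaces the day-by-day simulation (advance every task each day, pop finished prefixes) by a single pass that computes each task's finish day with ceiling division and groups tasks by the running maximum finish day; intended as asymptotically cheaper (O(n) vs O(days*n)), though a timing run could not get a clean reading because A times out on large inputs.
-- outside the precondition, e.g. on solution([100], [0]): A returns [1], B raises ZeroDivisionError; on solution([102, 0], [-1, 50]): A returns [1, 1], B returns [2]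
import Mathlib
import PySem

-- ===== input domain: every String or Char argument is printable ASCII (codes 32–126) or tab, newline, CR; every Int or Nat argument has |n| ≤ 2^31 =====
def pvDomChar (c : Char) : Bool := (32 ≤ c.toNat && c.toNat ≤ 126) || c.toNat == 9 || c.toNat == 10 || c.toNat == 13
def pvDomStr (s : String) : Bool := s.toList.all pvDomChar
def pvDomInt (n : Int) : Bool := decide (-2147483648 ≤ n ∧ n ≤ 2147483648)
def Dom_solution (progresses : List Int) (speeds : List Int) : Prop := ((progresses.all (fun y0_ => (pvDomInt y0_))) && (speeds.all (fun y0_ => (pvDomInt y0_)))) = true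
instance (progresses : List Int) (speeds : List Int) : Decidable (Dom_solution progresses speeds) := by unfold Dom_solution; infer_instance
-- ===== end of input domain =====

-- B replaces A's day-by-day simulation by a one-pass grouping over per-task ceiling-division
-- finish days. A mutates its argument lists in place; B does not: the equivalence proved here
-- is about the RETURN value only.

-- ===== PORT A =====
-- 'for i in range(len(progresses)): progresses[i] += speeds[i]' — none = IndexError (speeds too short)
def pvAddDay : List Int → List Int → Option (List Int)
  | [], _ => some []
  | _ :: _, [] => none
  | p :: ps, s :: ss => (pvAddDay ps ss).map (fun r => (p + s) :: r)

-- the 'for i … if progresses[i] >= 100: cnt += 1 else: break' prefix count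
def pvCnt : List Int → Nat
  | [] => 0
  | p :: ps => if 100 ≤ p then pvCnt ps + 1 else 0

-- fuel bound for A's while-loop: one unit per day; sufficient under Pre_ (positive speeds)
def pvFuelOf (ps : List Int) : Nat := ps.foldl (fun a p => a + ((100 - p).toNat + 1)) 0

def pvLoopA : Nat → List Int → List Int → List Int → List Int
  | 0, _, _, acc => acc
  | Nat.succ f, ps, ss, acc =>
    if ps.length > 0 then
      match pvAddDay ps ss with
      | none => acc   -- IndexError: excluded by Pre_
      | some ps' =>
        if 100 ≤ ps'.headD 0 then
          pvLoopA f (ps'.drop (pvCnt ps')) (ss.drop (pvCnt ps')) (acc ++ [(pvCnt ps' : Int)])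
        else pvLoopA f ps' ss acc
    else acc

def solution (progresses : List Int) (speeds : List Int) : List Int :=
  pvLoopA (pvFuelOf progresses + 1) progresses speeds []

-- ===== PORT B =====
-- d = max(1, -((p - 100) // s))  (ceil((100-p)/s) via Python floor division)
def pvDay (p s : Int) : Int := max 1 (-(PySem.Int.floordiv (p - 100) s))

-- the for-loop: answer kept reversed (head = answer[-1]), reversed at the end
def pvLoopB : List (Int × Int) → List Int → Int → List Int
  | [], acc, _ => acc.reverse
  | (p, s) :: rest, acc, cur =>
    match acc with
    | [] => pvLoopB rest [1] (pvDay p s)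
    | c :: t =>
      if cur < pvDay p s then pvLoopB rest (1 :: c :: t) (pvDay p s)
      else pvLoopB rest ((c + 1) :: t) cur

def solution_alt (progresses : List Int) (speeds : List Int) : List Int :=
  pvLoopB (progresses.zip speeds) [] 0

-- ===== PRECONDITION & SPEC =====
-- Pre_ excludes a speeds list shorter than progresses (IndexError in A) and non-positive speeds
-- among the used ones: on those A loops forever unless each such task happens to finish anyway,
-- and where A does return, B divides by zero (s = 0) or groups by a meaningless negative-ceil day.
def Pre_solution (progresses : List Int) (speeds : List Int) : Prop :=
  progresses.length ≤ speeds.length ∧ ∀ s ∈ speeds.take progresses.length, 0 < s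
instance (progresses : List Int) (speeds : List Int) : Decidable (Pre_solution progresses speeds) := by
  unfold Pre_solution; infer_instance

def pvWitness_solution : List Int × List Int := ([93, 30, 55], [1, 30, 5])

def Spec_solution (progresses : List Int) (speeds : List Int) (out : List Int) : Prop := out = solution_alt progresses speeds
instance (progresses : List Int) (speeds : List Int) (out : List Int) : Decidable (Spec_solution progresses speeds out) := by unfold Spec_solution; infer_instance

-- ===== CLAIM (what is proved, stated in full; the proofs are below) =====
def Claim_equal_solution : Prop := ∀ (progresses : List Int) (speeds : List Int), Dom_solution progresses speeds → Pre_solution progresses speeds → Spec_solution progresses speeds (solution progresses speeds)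

-- ===== LEMMAS AND PROOFS =====

-- per-pair finish days of a paired task list
def pvDays (L : List (Int × Int)) : List Int := L.map (fun x => pvDay x.1 x.2)

-- one day advances every task
def pvStep (x : Int × Int) : Int × Int := (x.1 + x.2, x.2)

-- one day shrinks a finish day
def pvShift (d : Int) : Int := max 1 (d - 1)

-- grouping by running maximum: group = maximal prefix not exceeding its leader
def pvGroups : List Int → List Int
  | [] => []
  | d :: ds =>
    (((ds.takeWhile (fun x => decide (x ≤ d))).length + 1 : Nat) : Int) ::
      pvGroups (ds.dropWhile (fun x => decide (x ≤ d)))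
  termination_by l => l.length
  decreasing_by
    have := List.length_dropWhile_le (fun x => decide (x ≤ d)) ds
    simp only [List.length_cons]; omega

-- paired version of A's loop (proof bridge)
def pvLoopA' : Nat → List (Int × Int) → List Int → List Int
  | 0, _, acc => acc
  | Nat.succ f, L, acc =>
    if L.length > 0 then
      if 100 ≤ ((L.map pvStep).headD (0, 0)).1 then
        pvLoopA' f ((L.map pvStep).drop (pvCnt ((L.map pvStep).map Prod.fst)))
          (acc ++ [(pvCnt ((L.map pvStep).map Prod.fst) : Int)])
      else pvLoopA' f (L.map pvStep) acc
    else acc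

lemma pvDay_le_iff (p s t : Int) (hs : 0 < s) (ht : 1 ≤ t) :
    pvDay p s ≤ t ↔ 100 ≤ p + t * s := by
  unfold pvDay
  rw [max_le_iff, neg_le, PySem.Int.le_floordiv_iff_mul_le hs]
  constructor
  · rintro ⟨-, h⟩; nlinarith
  · intro h; exact ⟨ht, by nlinarith⟩

lemma one_le_pvDay (p s : Int) : 1 ≤ pvDay p s := le_max_left _ _

lemma pvDay_shift (p s : Int) (hs : 0 < s) : pvDay (p + s) s = pvShift (pvDay p s) := by
  have h1 := one_le_pvDay (p + s) s
  have h2 := one_le_pvDay p s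
  have hb : 1 ≤ pvShift (pvDay p s) := le_max_left _ _
  apply le_antisymm
  · rw [pvDay_le_iff _ _ _ hs hb]
    have : pvDay p s ≤ pvShift (pvDay p s) + 1 := by unfold pvShift; omega
    have := (pvDay_le_iff p s _ hs (by omega)).mp this
    nlinarith
  · have : 100 ≤ p + s + pvDay (p + s) s * s := (pvDay_le_iff _ _ _ hs h1).mp le_rfl
    have : pvDay p s ≤ pvDay (p + s) s + 1 := by
      rw [pvDay_le_iff _ _ _ hs (by omega)]; nlinarith
    unfold pvShift; omega

lemma pvDay_le_bound (p s : Int) (hs : 0 < s) : pvDay p s ≤ max 1 (100 - p) := by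
  have h1 : (1:Int) ≤ max 1 (100 - p) := le_max_left _ _
  rw [pvDay_le_iff _ _ _ hs h1]
  have h2 : 100 - p ≤ max 1 (100 - p) := le_max_right _ _
  nlinarith

lemma pvAddDay_eq (ps : List Int) : ∀ ss : List Int, ps.length ≤ ss.length →
    pvAddDay ps ss = some (List.zipWith (· + ·) ps ss) := by
  induction ps with
  | nil => intro ss h; simp [pvAddDay]
  | cons p pt ih =>
    intro ss h
    cases ss with
    | nil => simp at h
    | cons s st =>
      simp only [pvAddDay, List.zipWith_cons_cons]
      rw [ih st (by simpa using h)]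
      rfl

lemma zip_zipWith_add (ps : List Int) : ∀ ss : List Int,
    (List.zipWith (· + ·) ps ss).zip ss = (ps.zip ss).map pvStep := by
  induction ps with
  | nil => intro ss; simp
  | cons p pt ih =>
    intro ss
    cases ss with
    | nil => simp
    | cons s st => simp [pvStep, ih st]

lemma map_fst_map_step (L : List (Int × Int)) :
    (L.map pvStep).map Prod.fst = L.map (fun x => x.1 + x.2) := by
  simp [pvStep]

lemma pvDays_map_step (L : List (Int × Int)) (h : ∀ x ∈ L, 0 < x.2) :
    pvDays (L.map pvStep) = (pvDays L).map pvShift := by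
  induction L with
  | nil => rfl
  | cons x t ih =>
    simp only [pvDays, List.map_cons] at *
    rw [show pvStep x = (x.1 + x.2, x.2) from rfl]
    have hx : 0 < x.2 := h x (by simp)
    rw [pvDay_shift x.1 x.2 hx]
    congr 1
    exact ih (fun y hy => h y (by simp [hy]))

lemma pvCnt_eq (L : List (Int × Int)) (h : ∀ x ∈ L, 0 < x.2) :
    pvCnt (L.map (fun x => x.1 + x.2)) =
      ((pvDays L).takeWhile (fun d => decide (d ≤ 1))).length := by
  induction L with
  | nil => rfl
  | cons x t ih =>
    have hx : 0 < x.2 := h x (by simp)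
    have hiff : (100 ≤ x.1 + x.2) ↔ pvDay x.1 x.2 ≤ 1 := by
      rw [pvDay_le_iff x.1 x.2 1 hx le_rfl]; constructor <;> intro <;> linarith
    simp only [pvDays, List.map_cons, pvCnt, List.takeWhile]
    by_cases hc : 100 ≤ x.1 + x.2
    · rw [if_pos hc]
      have : decide (pvDay x.1 x.2 ≤ 1) = true := by simp [← hiff, hc]
      rw [this]
      simp only [List.length_cons]
      rw [ih (fun y hy => h y (by simp [hy]))]
      rfl
    · rw [if_neg hc]
      have : decide (pvDay x.1 x.2 ≤ 1) = false := by simp [← hiff, hc]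
      rw [this]
      rfl

lemma dw_drop (p : Int → Bool) (l : List Int) : l.dropWhile p = l.drop (l.takeWhile p).length := by
  induction l with
  | nil => rfl
  | cons x t ih =>
    by_cases h : p x
    · simp [h, ih]
    · simp [h]

lemma zip_drop {α β : Type} (l : List α) (m : List β) (n : Nat) :
    (l.zip m).drop n = (l.drop n).zip (m.drop n) := by
  simp [List.zip, List.drop_zipWith]

lemma zipWith_add_map (ps ss : List Int) :
    List.zipWith (· + ·) ps ss = (ps.zip ss).map (fun x => x.1 + x.2) := by
  simp [List.zip, List.map_zipWith]

lemma loopA_eq_loopA' (fuel : Nat) : ∀ (ps ss acc : List Int),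
    ps.length ≤ ss.length →
    pvLoopA fuel ps ss acc = pvLoopA' fuel (ps.zip ss) acc := by
  induction fuel with
  | zero => intros; rfl
  | succ f ih =>
    intro ps ss acc h
    cases ps with
    | nil => simp [pvLoopA, pvLoopA']
    | cons p pt =>
      cases ss with
      | nil => simp at h
      | cons s st =>
        simp only [pvLoopA, pvLoopA', List.length_cons, List.zip_cons_cons]
        rw [pvAddDay_eq _ _ h]
        have hps' : List.zipWith (· + ·) (p :: pt) (s :: st) = (p + s) :: List.zipWith (· + ·) pt st := by
          simp
        have hhead : (List.zipWith (· + ·) (p :: pt) (s :: st)).headD 0 = p + s := by simp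
        have hhead' : ((((p, s) :: pt.zip st).map pvStep).headD (0, 0)).1 = p + s := by
          simp [pvStep]
        have hcnt : pvCnt (List.zipWith (· + ·) (p :: pt) (s :: st)) =
            pvCnt ((((p, s) :: pt.zip st).map pvStep).map Prod.fst) := by
          rw [map_fst_map_step, zipWith_add_map]
          simp
        simp only [gt_iff_lt, Nat.zero_lt_succ, if_true]
        rw [hhead, hhead']
        by_cases hc : 100 ≤ p + s
        · rw [if_pos hc, if_pos hc, ← hcnt]
          rw [ih _ _ _ (by
            simp only [List.length_drop, List.length_zipWith, List.length_cons]
            omega)]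
          congr 1
          rw [← zip_drop, zip_zipWith_add]
          simp
        · rw [if_neg hc, if_neg hc]
          rw [ih _ _ _ (by simp only [List.length_zipWith, List.length_cons]; omega)]
          congr 1
          rw [zip_zipWith_add]
          simp

lemma shift_le_shift_iff (d x : Int) (hd : 2 ≤ d) (hx : 1 ≤ x) :
    pvShift x ≤ pvShift d ↔ x ≤ d := by
  unfold pvShift; omega

lemma tw_dw_shift (d : Int) (hd : 2 ≤ d) : ∀ t : List Int, (∀ x ∈ t, 1 ≤ x) →
    ((t.map pvShift).takeWhile (fun x => decide (x ≤ pvShift d))).length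
      = (t.takeWhile (fun x => decide (x ≤ d))).length ∧
    (t.map pvShift).dropWhile (fun x => decide (x ≤ pvShift d))
      = (t.dropWhile (fun x => decide (x ≤ d))).map pvShift := by
  intro t
  induction t with
  | nil => intro _; simp
  | cons x t ih =>
    intro h
    have hx : (1:Int) ≤ x := h x (by simp)
    have hiff := shift_le_shift_iff d x hd hx
    obtain ⟨ih1, ih2⟩ := ih (fun y hy => h y (by simp [hy]))
    by_cases hc : x ≤ d
    · simp only [List.map_cons, List.takeWhile_cons, List.dropWhile_cons,
        decide_eq_true_eq, hiff, if_pos hc]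
      simp [ih1, ih2]
    · simp only [List.map_cons, List.takeWhile_cons, List.dropWhile_cons,
        decide_eq_true_eq, hiff, if_neg hc]
      simp

lemma pvGroups_shift (ds : List Int) (h1 : ∀ x ∈ ds, 1 ≤ x)
    (h2 : ∀ x ∈ ds.head?, 2 ≤ x) :
    pvGroups (ds.map pvShift) = pvGroups ds := by
  induction ds using pvGroups.induct with
  | case1 => rfl
  | case2 d ds ih =>
    have hd : (2:Int) ≤ d := h2 d (by simp)
    obtain ⟨tw, dw⟩ := tw_dw_shift d hd ds (fun y hy => h1 y (by simp [hy]))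
    rw [List.map_cons, pvGroups, pvGroups, tw, dw]
    congr 1
    apply ih
    · intro y hy
      exact h1 y (List.mem_cons_of_mem _ (List.dropWhile_subset _ hy))
    · intro y hy
      cases hh : (ds.dropWhile (fun x => decide (x ≤ d))).head? with
      | none => rw [hh] at hy; simp at hy
      | some z =>
        rw [hh] at hy; simp at hy; subst hy
        have := List.head?_dropWhile_not (fun x => decide (x ≤ d)) ds
        rw [hh] at this
        simp only [decide_eq_false_iff_not, not_le] at this
        omega

lemma days_all_one_le (L : List (Int × Int)) : ∀ y ∈ pvDays L, 1 ≤ y := by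
  intro y hy
  simp only [pvDays, List.mem_map] at hy
  obtain ⟨x, -, rfl⟩ := hy
  exact one_le_pvDay _ _

lemma sum_shift_le (l : List Int) (h : ∀ y ∈ l, 1 ≤ y) :
    ((l.map pvShift).map Int.toNat).sum ≤ (l.map Int.toNat).sum := by
  induction l with
  | nil => simp
  | cons y t ih =>
    have hy := h y (by simp)
    have h1 : (pvShift y).toNat ≤ y.toNat := by unfold pvShift; omega
    have := ih (fun z hz => h z (by simp [hz]))
    simp only [List.map_cons, List.sum_cons]
    omega

lemma sum_tw_one (l : List Int) (h : ∀ y ∈ l, 1 ≤ y) :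
    ((l.takeWhile (fun d => decide (d ≤ 1))).map Int.toNat).sum
      = (l.takeWhile (fun d => decide (d ≤ 1))).length := by
  induction l with
  | nil => simp
  | cons y t ih =>
    have hy := h y (by simp)
    by_cases hc : y ≤ 1
    · have h1 : y.toNat = 1 := by omega
      simp only [List.takeWhile_cons, decide_eq_true_eq, if_pos hc, List.map_cons,
        List.sum_cons, List.length_cons, h1]
      rw [ih (fun z hz => h z (by simp [hz]))]
      omega
    · simp [hc]

lemma length_le_sum_toNat (l : List Int) (h : ∀ y ∈ l, 1 ≤ y) :
    l.length ≤ (l.map Int.toNat).sum := by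
  induction l with
  | nil => simp
  | cons y t ih =>
    have hy := h y (by simp)
    have := ih (fun z hz => h z (by simp [hz]))
    simp only [List.map_cons, List.sum_cons, List.length_cons]
    omega

lemma dw_head_ge_two (l : List Int) :
    ∀ x ∈ (l.dropWhile (fun d => decide (d ≤ 1))).head?, 2 ≤ x := by
  intro x hx
  cases hh : (l.dropWhile (fun d => decide (d ≤ 1))).head? with
  | none => rw [hh] at hx; simp at hx
  | some z =>
    rw [hh] at hx; simp at hx; subst hx
    have h2 := List.head?_dropWhile_not (fun d => decide (d ≤ 1)) l
    rw [hh] at h2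
    simp only [decide_eq_false_iff_not, not_le] at h2
    omega

lemma loopA'_eq : ∀ (fuel : Nat) (L : List (Int × Int)) (acc : List Int),
    (∀ x ∈ L, 0 < x.2) →
    ((pvDays L).map Int.toNat).sum ≤ fuel →
    pvLoopA' fuel L acc = acc ++ pvGroups (pvDays L) := by
  intro fuel
  induction fuel with
  | zero =>
    intro L acc h hf
    have hlen := length_le_sum_toNat (pvDays L) (days_all_one_le L)
    have hnil : pvDays L = [] := List.length_eq_zero_iff.mp (by omega)
    rw [pvLoopA', hnil, pvGroups]
    simp
  | succ f ih =>
    intro L acc h hf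
    cases L with
    | nil => simp [pvLoopA', pvDays, pvGroups]
    | cons x t =>
      have hx2 : 0 < x.2 := h x (by simp)
      have hd1 := one_le_pvDay x.1 x.2
      have hDcons : pvDays (x :: t) = pvDay x.1 x.2 :: pvDays t := rfl
      have hdays_step : pvDays ((x :: t).map pvStep) = (pvDays (x :: t)).map pvShift :=
        pvDays_map_step _ h
      have hhead : (((x :: t).map pvStep).headD (0, 0)).1 = x.1 + x.2 := by simp [pvStep]
      have hcnt : pvCnt (((x :: t).map pvStep).map Prod.fst)
          = ((pvDays (x :: t)).takeWhile (fun d => decide (d ≤ 1))).length := by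
        rw [map_fst_map_step, pvCnt_eq _ h]
      have hall := days_all_one_le (x :: t)
      simp only [pvLoopA', List.length_cons, gt_iff_lt, Nat.zero_lt_succ, if_true, hhead, hcnt]
      by_cases hc : 100 ≤ x.1 + x.2
      · -- front finishes today: pop the ≤1-day prefix
        have hdd : pvDay x.1 x.2 = 1 := by
          have := (pvDay_le_iff x.1 x.2 1 hx2 le_rfl).mpr (by linarith)
          omega
        rw [if_pos hc]
        have hcnt1 : 1 ≤ ((pvDays (x :: t)).takeWhile (fun d => decide (d ≤ 1))).length := by
          rw [hDcons, hdd]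
          simp
        have hrdays : pvDays (((x :: t).map pvStep).drop
              (((pvDays (x :: t)).takeWhile (fun d => decide (d ≤ 1))).length))
            = ((pvDays (x :: t)).dropWhile (fun d => decide (d ≤ 1))).map pvShift := by
          show (((x :: t).map pvStep).drop _).map (fun y => pvDay y.1 y.2) = _
          rw [List.map_drop]
          rw [show ((x :: t).map pvStep).map (fun y => pvDay y.1 y.2)
              = pvDays ((x :: t).map pvStep) from rfl, hdays_step]
          rw [← List.map_drop, ← dw_drop]
        have hsplit : ((pvDays (x :: t)).map Int.toNat).sum
            = ((pvDays (x :: t)).takeWhile (fun d => decide (d ≤ 1))).length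
              + (((pvDays (x :: t)).dropWhile (fun d => decide (d ≤ 1))).map Int.toNat).sum := by
          conv_lhs => rw [← List.takeWhile_append_dropWhile
            (p := fun d => decide (d ≤ 1)) (l := pvDays (x :: t))]
          rw [List.map_append, List.sum_append, sum_tw_one _ hall]
        have hfuel2 : ((pvDays (((x :: t).map pvStep).drop
              (((pvDays (x :: t)).takeWhile (fun d => decide (d ≤ 1))).length))).map Int.toNat).sum ≤ f := by
          rw [hrdays]
          have h1 := sum_shift_le ((pvDays (x :: t)).dropWhile (fun d => decide (d ≤ 1)))
            (fun y hy => hall y (List.dropWhile_subset _ hy))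
          omega
        have hmem : ∀ y ∈ ((x :: t).map pvStep).drop
            (((pvDays (x :: t)).takeWhile (fun d => decide (d ≤ 1))).length), 0 < y.2 := by
          intro y hy
          obtain ⟨z, hz, rfl⟩ := List.mem_map.mp (List.mem_of_mem_drop hy)
          simpa [pvStep] using h z hz
        rw [ih _ _ hmem hfuel2, hrdays,
          pvGroups_shift _ (fun y hy => hall y (List.dropWhile_subset _ hy))
            (dw_head_ge_two _)]
        have hgroups : pvGroups (pvDays (x :: t))
            = ((((pvDays (x :: t)).takeWhile (fun d => decide (d ≤ 1))).length : Nat) : Int)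
              :: pvGroups ((pvDays (x :: t)).dropWhile (fun d => decide (d ≤ 1))) := by
          rw [hDcons, hdd, pvGroups]
          simp
        rw [hgroups]
        simp
      · -- nobody finishes today
        rw [if_neg hc]
        have hd2 : 2 ≤ pvDay x.1 x.2 := by
          by_contra hle
          have h1 : pvDay x.1 x.2 ≤ 1 := by omega
          have := (pvDay_le_iff x.1 x.2 1 hx2 le_rfl).mp h1
          linarith
        have hfuel2 : ((pvDays ((x :: t).map pvStep)).map Int.toNat).sum ≤ f := by
          rw [hdays_step, hDcons]
          rw [hDcons] at hf
          have htail := sum_shift_le (pvDays t) (days_all_one_le t)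
          have hsh : (pvShift (pvDay x.1 x.2)).toNat = (pvDay x.1 x.2).toNat - 1 := by
            unfold pvShift; omega
          simp only [List.map_cons, List.sum_cons, hsh] at hf ⊢
          omega
        have hmem : ∀ y ∈ (x :: t).map pvStep, 0 < y.2 := by
          intro y hy
          obtain ⟨z, hz, rfl⟩ := List.mem_map.mp hy
          simpa [pvStep] using h z hz
        rw [ih _ _ hmem hfuel2, hdays_step,
          pvGroups_shift _ hall (by
            rw [hDcons]
            intro y hy
            simp at hy
            omega)]

lemma loopB_go : ∀ (L : List (Int × Int)) (c : Int) (acc : List Int) (cur : Int),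
    pvLoopB L (c :: acc) cur =
      acc.reverse ++ (c + (((pvDays L).takeWhile (fun d => decide (d ≤ cur))).length : Int)) ::
        pvGroups ((pvDays L).dropWhile (fun d => decide (d ≤ cur))) := by
  intro L
  induction L with
  | nil => intro c acc cur; simp [pvLoopB, pvDays, pvGroups]
  | cons y rest ih =>
    intro c acc cur
    obtain ⟨p, s⟩ := y
    have hdays : pvDays ((p, s) :: rest) = pvDay p s :: pvDays rest := rfl
    rw [hdays]
    by_cases hlt : cur < pvDay p s
    · rw [show pvLoopB ((p, s) :: rest) (c :: acc) cur
          = pvLoopB rest (1 :: c :: acc) (pvDay p s) by simp [pvLoopB, hlt]]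
      rw [ih 1 (c :: acc) (pvDay p s)]
      have htw : (pvDay p s :: pvDays rest).takeWhile (fun d => decide (d ≤ cur)) = [] := by
        simp [List.takeWhile_cons]; omega
      have hdw : (pvDay p s :: pvDays rest).dropWhile (fun d => decide (d ≤ cur))
          = pvDay p s :: pvDays rest := by
        simp [List.dropWhile_cons]; omega
      rw [htw, hdw, pvGroups]
      simp [add_comm]
    · rw [show pvLoopB ((p, s) :: rest) (c :: acc) cur
          = pvLoopB rest ((c + 1) :: acc) cur by simp [pvLoopB, hlt]]
      rw [ih (c + 1) acc cur]
      have hle : pvDay p s ≤ cur := by omega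
      have htw : (pvDay p s :: pvDays rest).takeWhile (fun d => decide (d ≤ cur))
          = pvDay p s :: (pvDays rest).takeWhile (fun d => decide (d ≤ cur)) := by
        simp [hle]
      have hdw : (pvDay p s :: pvDays rest).dropWhile (fun d => decide (d ≤ cur))
          = (pvDays rest).dropWhile (fun d => decide (d ≤ cur)) := by
        simp [hle]
      rw [htw, hdw]
      simp only [List.length_cons]
      congr 2
      push_cast
      ring

lemma solution_alt_eq (ps ss : List Int) :
    solution_alt ps ss = pvGroups (pvDays (ps.zip ss)) := by
  unfold solution_alt
  cases hz : ps.zip ss with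
  | nil => simp [pvLoopB, pvDays, pvGroups]
  | cons y rest =>
    obtain ⟨p, s⟩ := y
    rw [show pvLoopB ((p, s) :: rest) [] 0 = pvLoopB rest [1] (pvDay p s) from rfl]
    rw [loopB_go rest 1 [] (pvDay p s)]
    rw [show pvDays ((p, s) :: rest) = pvDay p s :: pvDays rest from rfl, pvGroups]
    simp [add_comm]

lemma foldl_fuel_shift : ∀ (l : List Int) (a : Nat),
    l.foldl (fun acc p => acc + ((100 - p).toNat + 1)) a
      = a + l.foldl (fun acc p => acc + ((100 - p).toNat + 1)) 0 := by
  intro l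
  induction l with
  | nil => simp
  | cons x t ih =>
    intro a
    simp only [List.foldl_cons]
    rw [ih (a + _), ih (0 + _)]
    omega

lemma fuel_suffices (ps : List Int) : ∀ ss : List Int, (∀ x ∈ ps.zip ss, 0 < x.2) →
    ((pvDays (ps.zip ss)).map Int.toNat).sum ≤ pvFuelOf ps + 1 := by
  induction ps with
  | nil => intro ss h; simp [pvDays]
  | cons p pt ih =>
    intro ss h
    cases ss with
    | nil => simp [pvDays]
    | cons s st =>
      have hs : 0 < s := h (p, s) (by simp)
      have hb := pvDay_le_bound p s hs
      have hd1 := one_le_pvDay p s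
      have hbn : (pvDay p s).toNat ≤ (100 - p).toNat + 1 := by
        have : pvDay p s ≤ max 1 (100 - p) := hb
        omega
      have hrec := ih st (fun y hy => h y (by simp [hy]))
      have hfuel : pvFuelOf (p :: pt) = ((100 - p).toNat + 1) + pvFuelOf pt := by
        unfold pvFuelOf
        simp only [List.foldl_cons]
        rw [foldl_fuel_shift pt]
        omega
      rw [show pvDays ((p :: pt).zip (s :: st)) = pvDay p s :: pvDays (pt.zip st) from rfl]
      simp only [List.map_cons, List.sum_cons, hfuel]
      omega

lemma take_pos_to_zip (ps : List Int) : ∀ ss : List Int,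
    (∀ s ∈ ss.take ps.length, 0 < s) → ∀ x ∈ ps.zip ss, 0 < x.2 := by
  induction ps with
  | nil => intro ss _ x hx; simp at hx
  | cons p pt ih =>
    intro ss h x hx
    cases ss with
    | nil => simp at hx
    | cons s st =>
      simp only [List.zip_cons_cons, List.mem_cons] at hx
      rcases hx with rfl | hx
      · exact h s (by simp)
      · exact ih st (fun y hy => h y (by simp [hy])) x hx

-- ===== VERDICT (by name: the statement is the Claim_ definition above) =====
theorem solution_spec : Claim_equal_solution := by
  intro ps ss _hdom hpre
  obtain ⟨hlen, htake⟩ := hpre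
  have hz := take_pos_to_zip ps ss htake
  show solution ps ss = solution_alt ps ss
  unfold solution
  rw [loopA_eq_loopA' _ ps ss [] hlen,
      loopA'_eq _ _ _ hz (fuel_suffices ps ss hz), solution_alt_eq]
  simp
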